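-- pv_equiv track=rewrite | github.com/BAaboe/mcli | src/imapc.py | parseSingleparted
-- ===== SOURCE A (Python) =====
-- def parseSingleparted(content, hasBoundry=True):
--     contentDict = []
--     boundry = "THERE IS NO BOUNDRY"
--     if hasBoundry:
--         boundry = content[0].split("=")[1][1:-1]
--     contentSplit = []
--     remaningContent = content
--     while True:
--         if "--"+boundry in remaningContent:
--             index = remaningContent.index("--"+boundry)
--             contentSplit.append(remaningContent[:index-1])
--             remaningContent = remaningContent[index+1:]
--         else:
--             contentSplit.append(remaningContent)
--             break
--     for contentPart in contentSplit:
--         contentType = ""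
--         contentFormat = ""
--         contentEncoding = ""
--         name = ""
--         data = ""
--         skip = False
--         i = 0
--         for line in contentPart:
--             if line.startswith("Content-Type"):
--                 contentType, contentFormat = line.split(":")[1][1:].split(";")[0].split("/")
--                 if contentType == "multipart":
--                     skip = True
--                     break
--                 detail = line.split(":")[1][1:].split(";")[1][1:]
--                 if detail.startswith("name"):
--                     name = detail.split("=")[1][1:-1]
--             elif line.startswith("Content-Transfer-Encoding"):
--                 contentEncoding = line.split(":")[1][1:]
--             elif line == "":
--                 i +=1
--                 break
--             i += 1
--         if not skip:
--             data = "\n".join(contentPart[i:])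
--             data = data.replace(f"--{boundry}--", "")
--             contentDict.append({"type": f"{contentType.strip()}/{contentFormat.strip()}", "data": data, "encoding": contentEncoding, "fileName": name})
--
--     return contentDict
-- ===== SOURCE B (Python) =====
-- def parseSingleparted(content, hasBoundry=True):
--     if hasBoundry:
--         boundry = content[0].split("=")[1][1:-1]
--     else:
--         boundry = "THERE IS NO BOUNDRY"
--     marker = "--" + boundry
--     # collect all boundary positions in one scan instead of repeated in/index/reslice
--     positions = [k for k, line in enumerate(content) if line == marker]
--     parts = []
--     start = 0
--     for p in positions:
--         # the remainder, up to the line just before the boundary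
--         parts.append(content[start:][:p - start - 1])
--         start = p + 1
--     parts.append(content[start:])
--     result = []
--     for part in parts:
--         d = _parsePart(part, boundry)
--         if d is not None:
--             result.append(d)
--     return result
--
-- def _parsePart(part, boundry):
--     contentType = ""
--     contentFormat = ""
--     contentEncoding = ""
--     name = ""
--     i = 0
--     for line in part:
--         i += 1
--         if line.startswith("Content-Type"):
--             field = line.split(":")[1][1:]
--             contentType, contentFormat = field.split(";")[0].split("/")
--             if contentType == "multipart":
--                 return None
--             detail = field.split(";")[1][1:]
--             if detail.startswith("name"):
--                 name = detail.split("=")[1][1:-1]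
--         elif line.startswith("Content-Transfer-Encoding"):
--             contentEncoding = line.split(":")[1][1:]
--         elif line == "":
--             break
--     data = "\n".join(part[i:]).replace("--" + boundry + "--", "")
--     return {"type": contentType.strip() + "/" + contentFormat.strip(),
--             "data": data, "encoding": contentEncoding, "fileName": name}
-- ===== Notes on version B (the rewrite author's own statement) =====
-- stated objective: alternative
-- what changed: B replaces A's while-loop that repeatedly searches the remaining list with `in`/`.index` and reslices it by collecting all boundary-line positions in a single enumerate scan and cutting the parts from those positions with a running start index, with part-header parsing factored into an Option-returning helper instead of A's inline skip-flag loop.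
import Mathlib
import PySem

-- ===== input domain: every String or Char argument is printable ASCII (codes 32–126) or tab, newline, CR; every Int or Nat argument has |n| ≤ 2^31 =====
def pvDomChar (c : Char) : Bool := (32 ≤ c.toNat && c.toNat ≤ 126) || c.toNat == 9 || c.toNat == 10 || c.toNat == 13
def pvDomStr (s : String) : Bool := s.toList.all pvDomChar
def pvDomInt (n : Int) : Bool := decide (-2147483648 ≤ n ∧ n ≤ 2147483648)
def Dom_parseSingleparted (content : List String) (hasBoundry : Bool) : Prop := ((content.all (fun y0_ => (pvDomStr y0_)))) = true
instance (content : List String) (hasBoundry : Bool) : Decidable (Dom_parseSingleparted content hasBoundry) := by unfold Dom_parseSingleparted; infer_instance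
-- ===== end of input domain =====

-- B replaces A's while-loop that repeatedly searches the remaining list with `in`/`.index` and
-- reslices it by collecting all boundary positions in one enumerate scan and cutting the parts
-- from them, with part-header parsing factored into an Option-returning helper; same values.

-- shared input preprocessing (both Pythons contain these same lines verbatim)
def pvSplitStr (s sep : String) : List String := (PySem.Str.split? s sep).getD []

def pvBoundry (content : List String) (hasBoundry : Bool) : String :=
  if hasBoundry then
    PySem.Str.slice ((pvSplitStr (content.headD "") "=").getD 1 "") (some 1) (some (-1))
  else "THERE IS NO BOUNDRY"

-- ===== PORT A =====
-- the while-loop: find the first boundary line, cut, repeat.  The fuel argument only makes the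
-- loop structurally total: each iteration drops at least one line, so rem.length fuel suffices
-- and the fuel-0 case is unreachable.
def pvSplitA (marker : String) : Nat → List String → List (List String)
  | 0, rem => [rem]
  | fuel + 1, rem =>
    if marker ∈ rem then
      let idx : Nat := (PySem.List.index? rem marker).getD 0
      PySem.List.slice rem none (some ((idx : Int) - 1)) ::
        pvSplitA marker fuel (PySem.List.slice rem (some ((idx : Int) + 1)) none)
    else [rem]

-- the header-scanning for-loop of A: state (contentType, contentFormat, contentEncoding, name, skip, i)
def pvScanA : (String × String × String × String × Bool × Int) → List String →
    (String × String × String × String × Bool × Int)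
  | st, [] => st
  | (ct, cf, enc, nm, skip, i), line :: rest =>
    if PySem.Str.startswith line "Content-Type" then
      let field := PySem.Str.slice ((pvSplitStr line ":").getD 1 "") (some 1) none
      let tf := pvSplitStr ((pvSplitStr field ";").getD 0 "") "/"
      if tf.length = 2 then                                       -- the 2-tuple unpack of A
        let t := tf.getD 0 ""
        let f := tf.getD 1 ""
        if t = "multipart" then (t, f, enc, nm, true, i)          -- skip = True; break
        else
          let detail := PySem.Str.slice ((pvSplitStr field ";").getD 1 "") (some 1) none
          let nm' := if PySem.Str.startswith detail "name"
                     then PySem.Str.slice ((pvSplitStr detail "=").getD 1 "") (some 1) (some (-1))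
                     else nm
          pvScanA (t, f, enc, nm', skip, i + 1) rest
      else (ct, cf, enc, nm, skip, i)                             -- Python raises ValueError here (outside Pre_)
    else if PySem.Str.startswith line "Content-Transfer-Encoding" then
      pvScanA (ct, cf, PySem.Str.slice ((pvSplitStr line ":").getD 1 "") (some 1) none, nm, skip, i + 1) rest
    else if line = "" then (ct, cf, enc, nm, skip, i + 1)         -- break
    else pvScanA (ct, cf, enc, nm, skip, i + 1) rest

def parseSingleparted (content : List String) (hasBoundry : Bool) : List (List (String × String)) :=
  let boundry := pvBoundry content hasBoundry
  let contentSplit := pvSplitA ("--" ++ boundry) content.length content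
  contentSplit.foldl (fun acc part =>
    match pvScanA ("", "", "", "", false, 0) part with
    | (ct, cf, enc, nm, skip, i) =>
      if skip then acc
      else acc ++ [[("type", PySem.Str.strip ct ++ "/" ++ PySem.Str.strip cf),
                    ("data", PySem.Str.replace
                               (PySem.Str.join "\n" (PySem.List.slice part (some i) none))
                               ("--" ++ boundry ++ "--") ""),
                    ("encoding", enc), ("fileName", nm)]]) []

-- ===== PORT B =====
-- all boundary positions, collected in one enumerate scan
def pvPositions (marker : String) (xs : List String) : List Int :=
  ((PySem.List.enumerate xs).filter (fun kv => kv.2 == marker)).map (fun kv => kv.1)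

-- one step of B's cutting loop: emit the remainder up to the line just before boundary position p
def pvStepB (xs : List String) (acc : List (List String) × Int) (p : Int) :
    List (List String) × Int :=
  (acc.1 ++ [PySem.List.slice (PySem.List.slice xs (some acc.2) none) none (some (p - acc.2 - 1))],
   p + 1)

-- B's header scan: returns none on a multipart part; state (contentType, contentFormat, contentEncoding, name, i)
def pvScanB : (String × String × String × String × Int) → List String →
    Option (String × String × String × String × Int)
  | st, [] => some st
  | (ct, cf, enc, nm, i), line :: rest =>
    let i' := i + 1
    if PySem.Str.startswith line "Content-Type" then
      let field := PySem.Str.slice ((pvSplitStr line ":").getD 1 "") (some 1) none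
      let tf := pvSplitStr ((pvSplitStr field ";").getD 0 "") "/"
      if tf.length = 2 then                                       -- the 2-tuple unpack of B
        let t := tf.getD 0 ""
        let f := tf.getD 1 ""
        if t = "multipart" then none
        else
          let detail := PySem.Str.slice ((pvSplitStr field ";").getD 1 "") (some 1) none
          let nm' := if PySem.Str.startswith detail "name"
                     then PySem.Str.slice ((pvSplitStr detail "=").getD 1 "") (some 1) (some (-1))
                     else nm
          pvScanB (t, f, enc, nm', i') rest
      else some (ct, cf, enc, nm, i)                              -- Python raises ValueError here (outside Pre_)
    else if PySem.Str.startswith line "Content-Transfer-Encoding" then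
      pvScanB (ct, cf, PySem.Str.slice ((pvSplitStr line ":").getD 1 "") (some 1) none, nm, i') rest
    else if line = "" then some (ct, cf, enc, nm, i')             -- break
    else pvScanB (ct, cf, enc, nm, i') rest

def pvParsePart (boundry : String) (part : List String) : Option (List (String × String)) :=
  match pvScanB ("", "", "", "", 0) part with
  | none => none
  | some (ct, cf, enc, nm, i) =>
    some [("type", PySem.Str.strip ct ++ "/" ++ PySem.Str.strip cf),
          ("data", PySem.Str.replace
                     (PySem.Str.join "\n" (PySem.List.slice part (some i) none))
                     ("--" ++ boundry ++ "--") ""),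
          ("encoding", enc), ("fileName", nm)]

def parseSingleparted_alt (content : List String) (hasBoundry : Bool) : List (List (String × String)) :=
  let boundry := pvBoundry content hasBoundry
  let marker := "--" ++ boundry
  let st := (pvPositions marker content).foldl (pvStepB content) ([], 0)
  (st.1 ++ [PySem.List.slice content (some st.2) none]).foldl (fun res part =>
    match pvParsePart boundry part with
    | none => res
    | some d => res ++ [d]) []

-- ===== PRECONDITION & SPEC =====
-- well-formedness of one header-shaped line: exactly the splits A performs on a scanned line exist
def pvWfB (line : String) : Bool :=
  if PySem.Str.startswith line "Content-Type" then
    let ps := pvSplitStr line ":"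
    let field := PySem.Str.slice (ps.getD 1 "") (some 1) none
    let semi := pvSplitStr field ";"
    let tf := pvSplitStr (semi.getD 0 "") "/"
    decide (2 ≤ ps.length) && decide (tf.length = 2) &&
      (if tf.getD 0 "" = "multipart" then true
       else decide (2 ≤ semi.length) &&
         (let detail := PySem.Str.slice (semi.getD 1 "") (some 1) none
          if PySem.Str.startswith detail "name" then decide (2 ≤ (pvSplitStr detail "=").length) else true))
  else if PySem.Str.startswith line "Content-Transfer-Encoding" then
    decide (2 ≤ (pvSplitStr line ":").length)
  else true

-- Pre_ excludes the inputs on which Python A raises (IndexError/ValueError on the boundary line or on a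
-- malformed header line).  It is slightly conservative: it requires EVERY header-shaped line of content to
-- be well-formed, including lines A never scans because they sit after a blank line or a multipart header
-- (A returns normally there); see claim.json "cites".
def Pre_parseSingleparted (content : List String) (hasBoundry : Bool) : Prop :=
  (hasBoundry = true → content ≠ [] ∧ 2 ≤ (pvSplitStr (content.headD "") "=").length) ∧
  content.all pvWfB = true
instance (content : List String) (hasBoundry : Bool) : Decidable (Pre_parseSingleparted content hasBoundry) := by
  unfold Pre_parseSingleparted; infer_instance

def pvWitness_parseSingleparted : List String × Bool := (["boundary=\"b\""], true)

def Spec_parseSingleparted (content : List String) (hasBoundry : Bool) (out : List (List (String × String))) : Prop :=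
  out = parseSingleparted_alt content hasBoundry
instance (content : List String) (hasBoundry : Bool) (out : List (List (String × String))) : Decidable (Spec_parseSingleparted content hasBoundry out) := by unfold Spec_parseSingleparted; infer_instance

-- ===== CLAIM (what is proved, stated in full; the proofs are below) =====
def Claim_equal_parseSingleparted : Prop := ∀ (content : List String) (hasBoundry : Bool), Dom_parseSingleparted content hasBoundry → Pre_parseSingleparted content hasBoundry → Spec_parseSingleparted content hasBoundry (parseSingleparted content hasBoundry)

-- ===== LEMMAS AND PROOFS =====

theorem pvEnumShift (xs : List String) :
    ∀ s : Int, PySem.List.enumerate xs s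
      = (PySem.List.enumerate xs 0).map (fun p => (p.1 + s, p.2)) := by
  induction xs with
  | nil => intro s; simp [PySem.List.enumerate_nil]
  | cons x xs ih =>
    intro s
    rw [PySem.List.enumerate_cons, PySem.List.enumerate_cons, ih (s + 1), ih (0 + 1)]
    simp only [List.map_cons, List.map_map]
    congr 1
    · simp
    · apply List.map_congr_left
      intro p _
      simp only [Function.comp_apply]
      refine Prod.ext ?_ rfl
      simp; ring

theorem pvPositions_cons (marker x : String) (xs : List String) :
    pvPositions marker (x :: xs)
      = (if x = marker then [(0 : Int)] else []) ++ (pvPositions marker xs).map (· + 1) := by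
  unfold pvPositions
  rw [PySem.List.enumerate_cons, pvEnumShift xs (0 + 1), List.filter_cons, List.filter_map]
  by_cases hx : x = marker
  · simp only [hx, List.map_map]
    simp [Function.comp_def]
  · simp only [List.map_map]
    simp [hx, Function.comp_def]

theorem pvPositions_nil_of_not_mem (marker : String) :
    ∀ xs : List String, marker ∉ xs → pvPositions marker xs = [] := by
  intro xs
  induction xs with
  | nil => intro _; rfl
  | cons x xs ih =>
    intro h
    rw [pvPositions_cons]
    have hx : ¬ x = marker := fun he => h (by simp [he])
    rw [if_neg hx, ih (fun hm => h (by simp [hm]))]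
    rfl

theorem pvPositions_nonneg (marker : String) :
    ∀ (xs : List String), ∀ p ∈ pvPositions marker xs, 0 ≤ p := by
  intro xs
  induction xs with
  | nil => intro p hp; simp [pvPositions] at hp
  | cons x xs ih =>
    intro p hp
    rw [pvPositions_cons] at hp
    rcases List.mem_append.mp hp with h | h
    · split_ifs at h with hx
      · simp at h; omega
      · simp at h
    · obtain ⟨q, hq, rfl⟩ := List.mem_map.mp h
      have := ih q hq
      omega

theorem pvPositions_decomp (marker : String) :
    ∀ (pre rest : List String), marker ∉ pre →
    pvPositions marker (pre ++ marker :: rest)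
      = (pre.length : Int) :: (pvPositions marker rest).map (· + (pre.length + 1)) := by
  intro pre
  induction pre with
  | nil =>
    intro rest _
    rw [List.nil_append, pvPositions_cons, if_pos rfl]
    simp
  | cons a pre ih =>
    intro rest h
    have ha : ¬ a = marker := fun he => h (by simp [he])
    rw [List.cons_append, pvPositions_cons, if_neg ha,
        ih rest (fun hm => h (by simp [hm]))]
    simp only [List.nil_append, List.map_cons, List.map_map, List.length_cons]
    congr 1
    apply List.map_congr_left
    intro q _
    simp only [Function.comp_apply]
    omega

theorem pvSliceShift (xs : List String) (c : Nat) (s : Int) (h : 0 ≤ s) :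
    PySem.List.slice xs (some (s + c)) none = PySem.List.slice (xs.drop c) (some s) none := by
  rw [PySem.List.slice_from xs (a := s + (c : Int)) (by omega),
      PySem.List.slice_from (xs.drop c) (a := s) h, List.drop_drop]
  congr 1
  omega

theorem pvPrefix (xs : List String) :
    ∀ (P : List Int) (ps : List (List String)) (s : Int),
    P.foldl (pvStepB xs) (ps, s)
      = (ps ++ (P.foldl (pvStepB xs) ([], s)).1, (P.foldl (pvStepB xs) ([], s)).2) := by
  intro P
  induction P with
  | nil => intro ps s; simp
  | cons p P ih =>
    intro ps s
    simp only [List.foldl_cons, pvStepB, List.nil_append]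
    rw [ih (ps ++ [PySem.List.slice (PySem.List.slice xs (some s) none) none (some (p - s - 1))]) (p + 1),
        ih [PySem.List.slice (PySem.List.slice xs (some s) none) none (some (p - s - 1))] (p + 1)]
    simp

theorem pvStartNonneg (xs : List String) :
    ∀ (P : List Int) (ps : List (List String)) (s : Int), 0 ≤ s → (∀ p ∈ P, 0 ≤ p) →
    0 ≤ (P.foldl (pvStepB xs) (ps, s)).2 := by
  intro P
  induction P with
  | nil => intro ps s hs _; simpa using hs
  | cons p P ih =>
    intro ps s hs hP
    simp only [List.foldl_cons, pvStepB]
    exact ih _ (p + 1) (by have := hP p (by simp); omega) (fun q hq => hP q (by simp [hq]))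

theorem pvShift (xs : List String) :
    ∀ (P : List Int) (c : Nat) (ps : List (List String)) (s : Int), 0 ≤ s → (∀ p ∈ P, 0 ≤ p) →
    (P.map (· + (c : Int))).foldl (pvStepB xs) (ps, s + c)
      = (ps ++ (P.foldl (pvStepB (xs.drop c)) ([], s)).1,
         (P.foldl (pvStepB (xs.drop c)) ([], s)).2 + c) := by
  intro P
  induction P with
  | nil => intro c ps s hs _; simp
  | cons p P ih =>
    intro c ps s hs hP
    have hp : 0 ≤ p := hP p (by simp)
    simp only [List.map_cons, List.foldl_cons, pvStepB]
    have harg : p + (c : Int) - (s + c) - 1 = p - s - 1 := by ring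
    rw [harg, pvSliceShift xs c s hs]
    have hpc : p + (c : Int) + 1 = (p + 1) + c := by ring
    rw [hpc, ih c _ (p + 1) (by omega) (fun q hq => hP q (by simp [hq]))]
    conv_rhs =>
      rw [pvPrefix (xs.drop c) P
           ([] ++ [PySem.List.slice (PySem.List.slice (xs.drop c) (some s) none) none (some (p - s - 1))]) (p + 1)]
    simp

-- the split phase: A's repeated cut-and-rescan equals B's position-based single pass
theorem pvSplit_eq (marker : String) :
    ∀ (fuel : Nat) (rem : List String), rem.length ≤ fuel →
    pvSplitA marker fuel rem
      = ((pvPositions marker rem).foldl (pvStepB rem) ([], 0)).1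
          ++ [PySem.List.slice rem (some (((pvPositions marker rem).foldl (pvStepB rem) ([], 0)).2)) none] := by
  intro fuel
  induction fuel with
  | zero =>
    intro rem hlen
    have hnil : rem = [] := List.length_eq_zero_iff.mp (Nat.le_zero.mp hlen)
    subst hnil
    have hpos : pvPositions marker [] = [] := rfl
    rw [hpos]
    simp only [List.foldl_nil, List.nil_append]
    rw [PySem.List.slice_from ([] : List String) (a := 0) le_rfl]
    rfl
  | succ n ih =>
    intro rem hlen
    by_cases hmem : marker ∈ rem
    · obtain ⟨idx, hidx⟩ := Option.isSome_iff_exists.mp ((PySem.List.index?_isSome_iff rem marker).mpr hmem)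
      obtain ⟨pre, rest, hdec, hplen, hpre⟩ := (PySem.List.index?_eq_some_iff rem marker idx).mp hidx
      -- A side
      rw [pvSplitA]
      simp only [if_pos hmem, hidx, Option.getD_some]
      have hsliceR : PySem.List.slice rem (some ((idx : Int) + 1)) none = rest := by
        have hc : ((idx : Int) + 1) = ((idx + 1 : Nat) : Int) := by push_cast; ring
        rw [hc, PySem.List.slice_from_natCast, hdec]
        have h1 : idx + 1 = (pre ++ [marker]).length := by simp [hplen]
        rw [h1, show pre ++ marker :: rest = (pre ++ [marker]) ++ rest by simp, List.drop_left]
      have hlenrest : rest.length ≤ n := by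
        have : rem.length = pre.length + (rest.length + 1) := by simp [hdec]
        omega
      rw [hsliceR, ih rest hlenrest]
      -- B side: decompose the position list
      have hposdec : pvPositions marker rem
          = (idx : Int) :: (pvPositions marker rest).map (· + ((idx : Int) + 1)) := by
        rw [hdec, pvPositions_decomp marker pre rest hpre, hplen]
      rw [hposdec]
      simp only [List.foldl_cons, pvStepB, List.nil_append]
      -- first emitted segment
      have hseg0 : PySem.List.slice (PySem.List.slice rem (some 0) none) none (some ((idx : Int) - 0 - 1))
          = PySem.List.slice rem none (some ((idx : Int) - 1)) := by
        rw [PySem.List.slice_zero_start, PySem.List.slice_none_none]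
        norm_num
      rw [hseg0]
      -- shift the remaining positions onto rest
      have hdrop : rem.drop (idx + 1) = rest := by
        rw [hdec]
        have h1 : idx + 1 = (pre ++ [marker]).length := by simp [hplen]
        rw [h1, show pre ++ marker :: rest = (pre ++ [marker]) ++ rest by simp, List.drop_left]
      have hmapc : (pvPositions marker rest).map (· + ((idx : Int) + 1))
          = (pvPositions marker rest).map (· + ((idx + 1 : Nat) : Int)) := by
        apply List.map_congr_left; intro q _; push_cast; ring
      rw [hmapc]
      have hshift := pvShift rem (pvPositions marker rest) (idx + 1)
        [PySem.List.slice rem none (some ((idx : Int) - 1))] 0 le_rfl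
        (pvPositions_nonneg marker rest)
      rw [show ((idx : Int) + 1) = ((0 : Int) + ((idx + 1 : Nat) : Int)) from by push_cast; ring]
      rw [hshift, hdrop]
      -- the final tail segment
      have hr2 : 0 ≤ ((pvPositions marker rest).foldl (pvStepB rest) ([], 0)).2 :=
        pvStartNonneg rest (pvPositions marker rest) [] 0 le_rfl (pvPositions_nonneg marker rest)
      rw [pvSliceShift rem (idx + 1) _ hr2, hdrop]
      simp
    · rw [pvSplitA]
      simp only [if_neg hmem]
      rw [pvPositions_nil_of_not_mem marker rem hmem]
      simp only [List.foldl_nil, List.nil_append]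
      rw [PySem.List.slice_from rem (a := 0) le_rfl]
      rfl

-- proof helper: read A's skip flag off its final state
def pvSkipOf (r : String × String × String × String × Bool × Int) :
    Option (String × String × String × String × Int) :=
  if r.2.2.2.2.1 then none else some (r.1, r.2.1, r.2.2.1, r.2.2.2.1, r.2.2.2.2.2)

-- the header scan: B's Option-returning scan is A's scan with the skip flag read off
theorem pvScan_eq :
    ∀ (lines : List String) (ct cf enc nm : String) (i : Int),
    pvScanB (ct, cf, enc, nm, i) lines
      = pvSkipOf (pvScanA (ct, cf, enc, nm, false, i) lines) := by
  intro lines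
  induction lines with
  | nil => intro ct cf enc nm i; simp [pvScanA, pvScanB, pvSkipOf]
  | cons line rest ih =>
    intro ct cf enc nm i
    simp only [pvScanA, pvScanB]
    split_ifs with h1 h2 h3 h4 h5 h6
    · simp [pvSkipOf]
    · exact ih _ _ _ _ _
    · exact ih _ _ _ _ _
    · simp [pvSkipOf]
    · exact ih _ _ _ _ _
    · simp [pvSkipOf]
    · exact ih _ _ _ _ _

theorem pvA_eq (content : List String) (hasBoundry : Bool) :
    parseSingleparted content hasBoundry
      = (pvSplitA ("--" ++ pvBoundry content hasBoundry) content.length content).foldl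
          (fun acc part =>
            match pvScanA ("", "", "", "", false, 0) part with
            | (ct, cf, enc, nm, skip, i) =>
              if skip then acc
              else acc ++ [[("type", PySem.Str.strip ct ++ "/" ++ PySem.Str.strip cf),
                            ("data", PySem.Str.replace
                                       (PySem.Str.join "\n" (PySem.List.slice part (some i) none))
                                       ("--" ++ pvBoundry content hasBoundry ++ "--") ""),
                            ("encoding", enc), ("fileName", nm)]]) [] := rfl

theorem pvB_eq (content : List String) (hasBoundry : Bool) :
    parseSingleparted_alt content hasBoundry
      = (((pvPositions ("--" ++ pvBoundry content hasBoundry) content).foldl (pvStepB content) ([], 0)).1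
           ++ [PySem.List.slice content
                 (some (((pvPositions ("--" ++ pvBoundry content hasBoundry) content).foldl (pvStepB content) ([], 0)).2)) none]).foldl
          (fun res part =>
            match pvParsePart (pvBoundry content hasBoundry) part with
            | none => res
            | some d => res ++ [d]) [] := rfl

theorem pvBody_eq (boundry : String) (acc : List (List (String × String))) (part : List String) :
    (match pvScanA ("", "", "", "", false, 0) part with
     | (ct, cf, enc, nm, skip, i) =>
       if skip then acc
       else acc ++ [[("type", PySem.Str.strip ct ++ "/" ++ PySem.Str.strip cf),
                     ("data", PySem.Str.replace
                                (PySem.Str.join "\n" (PySem.List.slice part (some i) none))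
                                ("--" ++ boundry ++ "--") ""),
                     ("encoding", enc), ("fileName", nm)]])
    = (match pvParsePart boundry part with
       | none => acc
       | some d => acc ++ [d]) := by
  rw [pvParsePart, pvScan_eq]
  obtain ⟨ct, cf, enc, nm, skip, i⟩ := pvScanA ("", "", "", "", false, 0) part
  cases skip <;> simp [pvSkipOf]

-- ===== VERDICT (by name: the statement is the Claim_ definition above) =====
theorem parseSingleparted_spec : Claim_equal_parseSingleparted := by
  intro content hasBoundry _ _
  show parseSingleparted content hasBoundry = parseSingleparted_alt content hasBoundry
  rw [pvA_eq, pvB_eq,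
      pvSplit_eq ("--" ++ pvBoundry content hasBoundry) content.length content le_rfl]
  exact PySem.List.foldl_congr_mem _ _ _ _ (fun acc part _ => pvBody_eq _ acc part)
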